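-- pv_equiv track=rewrite | github.com/aviyadav/duckdb-101 | duckdb-transaction-data-analysis/generate-transaction-data-mp.py | build_sub_tasks
-- ===== SOURCE A (Python) =====
-- def build_sub_tasks(
--     batch_start: int,
--     batch_size: int,
--     num_workers: int,
--     batch_num: int,
-- ) -> list[tuple[int, int, int]]:
--     """
--     Divide one batch into per-worker sub-tasks with unique deterministic seeds.
--
--     Two large primes keep (batch_num, worker_idx) seeds far apart in seed-space
--     so no two workers ever share overlapping RNG sequences.
--     """
--     base = batch_size // num_workers
--     extras = batch_size % num_workers
--     tasks: list[tuple[int, int, int]] = []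
--     idx = batch_start
--     for i in range(num_workers):
--         count = base + (1 if i < extras else 0)
--         seed = batch_num * 104_729 + i * 7_919
--         tasks.append((idx, count, seed))
--         idx += count
--     return tasks
-- ===== SOURCE B (Python) =====
-- def _starts(start, counts):
--     """Prefix-sums: the start offset of each count, plus one past the end."""
--     starts = [start]
--     for c in counts:
--         starts.append(starts[-1] + c)
--     return starts
--
--
-- def build_sub_tasks(
--     batch_start: int,
--     batch_size: int,
--     num_workers: int,
--     batch_num: int,
-- ) -> list[tuple[int, int, int]]:
--     """Staged version: build the counts list, derive the start offsets as its
--     prefix sums, build the seeds list, and zip the three together."""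
--     base, extras = divmod(batch_size, num_workers)
--     counts = [base + 1] * extras + [base] * (num_workers - extras)
--     starts = _starts(batch_start, counts)
--     seeds = [batch_num * 104_729 + i * 7_919 for i in range(num_workers)]
--     return list(zip(starts, counts, seeds))
-- ===== Notes on version B (the rewrite author's own statement) =====
-- stated objective: alternative
-- what changed: Replaces the single loop threading a running idx accumulator through appended tuples with staged passes: a counts list built from two replications, a start-offsets list as its prefix sums, a seeds list, and a final zip of the three.
import Mathlib
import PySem

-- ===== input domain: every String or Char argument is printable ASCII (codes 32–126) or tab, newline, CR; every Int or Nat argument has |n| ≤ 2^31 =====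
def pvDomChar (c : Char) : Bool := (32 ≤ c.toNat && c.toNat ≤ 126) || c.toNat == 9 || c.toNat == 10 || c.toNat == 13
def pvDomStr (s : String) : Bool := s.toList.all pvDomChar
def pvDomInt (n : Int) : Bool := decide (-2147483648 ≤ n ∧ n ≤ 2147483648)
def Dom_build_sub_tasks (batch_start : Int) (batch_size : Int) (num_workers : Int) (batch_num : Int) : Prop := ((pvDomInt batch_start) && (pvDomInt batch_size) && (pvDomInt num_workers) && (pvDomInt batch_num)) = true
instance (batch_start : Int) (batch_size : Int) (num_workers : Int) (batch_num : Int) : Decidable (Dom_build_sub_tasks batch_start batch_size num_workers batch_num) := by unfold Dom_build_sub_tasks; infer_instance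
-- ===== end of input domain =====

-- B replaces A's single accumulator loop with staged passes (counts list, recursive prefix-sum of starts, seeds list, zip); alternative decomposition, same cost.


-- ===== PORT A =====
def build_sub_tasks (batch_start : Int) (batch_size : Int) (num_workers : Int) (batch_num : Int) : List (Int × Int × Int) :=
  let base := PySem.Int.floordiv batch_size num_workers
  let extras := PySem.Int.mod batch_size num_workers
  let st := (PySem.List.pyRange 0 num_workers 1).foldl
    (fun (st : List (Int × Int × Int) × Int) i =>
      let count := base + (if i < extras then 1 else 0)
      let seed := batch_num * 104729 + i * 7919
      (st.1 ++ [(st.2, count, seed)], st.2 + count))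
    ([], batch_start)
  st.1

-- ===== PORT B =====
-- Python helper _starts: starts = [start]; for c in counts: starts.append(starts[-1] + c)
-- (starts[-1] on the always-nonempty list is ported as getLast!, exact here).
def pvStarts (start : Int) (counts : List Int) : List Int :=
  counts.foldl (fun st c => st ++ [st.getLast! + c]) [start]

def build_sub_tasks_alt (batch_start : Int) (batch_size : Int) (num_workers : Int) (batch_num : Int) : List (Int × Int × Int) :=
  let base := PySem.Int.floordiv batch_size num_workers
  let extras := PySem.Int.mod batch_size num_workers
  let counts := List.replicate extras.toNat (base + 1) ++ List.replicate (num_workers - extras).toNat base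
  let starts := pvStarts batch_start counts
  let seeds := (PySem.List.pyRange 0 num_workers 1).map (fun i => batch_num * 104729 + i * 7919)
  List.zip starts (List.zip counts seeds)

-- ===== PRECONDITION & SPEC =====
-- Pre_ excludes only num_workers = 0, on which the Python A raises ZeroDivisionError (batch_size // num_workers).
def Pre_build_sub_tasks (batch_start : Int) (batch_size : Int) (num_workers : Int) (batch_num : Int) : Prop := num_workers ≠ 0
instance (batch_start : Int) (batch_size : Int) (num_workers : Int) (batch_num : Int) : Decidable (Pre_build_sub_tasks batch_start batch_size num_workers batch_num) := by unfold Pre_build_sub_tasks; infer_instance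
def pvWitness_build_sub_tasks : Int × Int × Int × Int := (100, 10, 3, 2)

def Spec_build_sub_tasks (batch_start : Int) (batch_size : Int) (num_workers : Int) (batch_num : Int) (out : List (Int × Int × Int)) : Prop := out = build_sub_tasks_alt batch_start batch_size num_workers batch_num
instance (batch_start : Int) (batch_size : Int) (num_workers : Int) (batch_num : Int) (out : List (Int × Int × Int)) : Decidable (Spec_build_sub_tasks batch_start batch_size num_workers batch_num out) := by unfold Spec_build_sub_tasks; infer_instance

-- ===== CLAIM (what is proved, stated in full; the proofs are below) =====
def Claim_equal_build_sub_tasks : Prop := ∀ (batch_start : Int) (batch_size : Int) (num_workers : Int) (batch_num : Int), Dom_build_sub_tasks batch_start batch_size num_workers batch_num → Pre_build_sub_tasks batch_start batch_size num_workers batch_num → Spec_build_sub_tasks batch_start batch_size num_workers batch_num (build_sub_tasks batch_start batch_size num_workers batch_num)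

-- ===== LEMMAS AND PROOFS =====

-- Proof-only recursive characterisation of the _starts loop.
def pvStartsRec (start : Int) : List Int → List Int
  | [] => [start]
  | c :: rest => start :: pvStartsRec (start + c) rest

lemma pvStarts_foldl_eq (counts : List Int) (acc : List Int) (h : acc ≠ []) :
    counts.foldl (fun st c => st ++ [st.getLast! + c]) acc
      = acc.dropLast ++ pvStartsRec acc.getLast! counts := by
  induction counts generalizing acc with
  | nil =>
    obtain ⟨ys, y, rfl⟩ : ∃ ys y, acc = ys ++ [y] :=
      ⟨acc.dropLast, acc.getLast h, (List.dropLast_append_getLast h).symm⟩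
    simp [pvStartsRec]
  | cons c rest ih =>
    obtain ⟨ys, y, rfl⟩ : ∃ ys y, acc = ys ++ [y] :=
      ⟨acc.dropLast, acc.getLast h, (List.dropLast_append_getLast h).symm⟩
    simp only [List.foldl_cons]
    rw [ih ((ys ++ [y]) ++ [(ys ++ [y]).getLast! + c]) (by simp)]
    simp [pvStartsRec]

lemma pvStarts_eq_rec (start : Int) (counts : List Int) :
    pvStarts start counts = pvStartsRec start counts := by
  unfold pvStarts
  rw [pvStarts_foldl_eq counts [start] (by simp)]
  simp

-- A-side: the fold over range(0, n) computed in closed form.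
lemma build_loop_eq (base extras bs bn : Int) (hex : 0 ≤ extras) (n : Nat) :
    (PySem.List.pyRange 0 (n : Int) 1).foldl
      (fun (st : List (Int × Int × Int) × Int) i =>
        (st.1 ++ [(st.2, base + (if i < extras then 1 else 0), bn * 104729 + i * 7919)],
         st.2 + (base + (if i < extras then 1 else 0))))
      ([], bs)
    = ((PySem.List.pyRange 0 (n : Int) 1).map
        (fun i => (bs + base * i + min i extras,
                   base + (if i < extras then 1 else 0),
                   bn * 104729 + i * 7919)),
       bs + base * n + min (n : Int) extras) := by
  induction n with
  | zero => norm_num [PySem.List.pyRange_zero]; omega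
  | succ m ih =>
    have hsplit : PySem.List.pyRange 0 ((m + 1 : Nat) : Int) 1
        = PySem.List.pyRange 0 (m : Int) 1 ++ [(m : Int)] := by
      have := PySem.List.pyRange_one_succ_right (a := 0) (b := (m : Int)) (Int.natCast_nonneg m)
      push_cast
      simpa using this
    rw [hsplit, List.foldl_append, List.map_append, ih]
    simp only [List.foldl_cons, List.foldl_nil, List.map_cons, List.map_nil, Prod.mk.injEq]
    refine ⟨trivial, ?_⟩
    push_cast
    have hmin : min ((m : Int) + 1) extras
        = min (m : Int) extras + (if (m : Int) < extras then 1 else 0) := by omega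
    rw [hmin]; ring

lemma length_pvStartsRec (s : Int) (l : List Int) : (pvStartsRec s l).length = l.length + 1 := by
  induction l generalizing s with
  | nil => simp [pvStartsRec]
  | cons c rest ih => simp [pvStartsRec, ih]

lemma getElem_pvStartsRec (s : Int) (l : List Int) (i : Nat) (h : i < l.length + 1) :
    (pvStartsRec s l)[i]'(by rw [length_pvStartsRec]; omega) = s + (l.take i).sum := by
  induction l generalizing s i with
  | nil =>
    have hi : i = 0 := by simp at h; omega
    subst hi
    simp [pvStartsRec]
  | cons c rest ih =>
    cases i with
    | zero => simp [pvStartsRec]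
    | succ j =>
      simp only [pvStartsRec, List.getElem_cons_succ, List.take_succ_cons, List.sum_cons]
      rw [ih (s + c) j (by simpa using h)]
      ring

-- B-side counts list: its length and its i-th element.
lemma counts_length (base : Int) (e k : Nat) :
    (List.replicate e (base + 1) ++ List.replicate k base).length = e + k := by simp

lemma counts_getElem (base : Int) (e k i : Nat) (h : i < e + k) :
    (List.replicate e (base + 1) ++ List.replicate k base)[i]'(by simpa [counts_length]) =
      base + (if (i : Int) < (e : Int) then 1 else 0) := by
  by_cases hi : i < e
  · rw [List.getElem_append_left (by simpa using hi)]
    simp [hi]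
  · rw [List.getElem_append_right (by simpa using hi)]
    simp
    omega

-- Sum of the first i counts = base*i + min i e.
lemma counts_take_sum (base : Int) (e k i : Nat) (h : i ≤ e + k) :
    ((List.replicate e (base + 1) ++ List.replicate k base).take i).sum
      = base * i + min (i : Int) (e : Int) := by
  rw [List.take_append, List.take_replicate, List.take_replicate,
      List.sum_append, List.sum_replicate, List.sum_replicate, List.length_replicate]
  by_cases hi : i ≤ e
  · have h1 : min i e = i := by omega
    have h2 : i - e = 0 := by omega
    have h3 : min ((i : Int)) ((e : Int)) = (i : Int) := by omega
    simp [h1, h2, h3]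
    ring
  · have h1 : min i e = e := by omega
    have h2 : min (i - e) k = i - e := by omega
    have h3 : min ((i : Int)) ((e : Int)) = (e : Int) := by omega
    rw [h1, h2, h3]
    simp only [nsmul_eq_mul]
    push_cast [Nat.cast_sub (by omega : e ≤ i)]
    ring

theorem build_sub_tasks_spec : Claim_equal_build_sub_tasks := by
  intro bs sz nw bn _ hnw
  unfold Spec_build_sub_tasks
  simp only [build_sub_tasks, build_sub_tasks_alt]
  by_cases hpos : 0 < nw
  · obtain ⟨n, rfl⟩ : ∃ n : Nat, nw = (n : Int) := ⟨nw.toNat, by omega⟩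
    have hex : 0 ≤ PySem.Int.mod sz (n : Int) := PySem.Int.mod_nonneg sz hpos
    have hlt : PySem.Int.mod sz (n : Int) < (n : Int) := PySem.Int.mod_lt sz hpos
    set base := PySem.Int.floordiv sz (n : Int) with hbase
    set extras := PySem.Int.mod sz (n : Int) with hextras
    set e := extras.toNat with he
    set k := ((n : Int) - extras).toNat with hk
    have hext' : extras = (e : Int) := by omega
    have hek : e + k = n := by omega
    rw [build_loop_eq base extras bs bn hex n, pvStarts_eq_rec]
    apply List.ext_getElem
    · simp [length_pvStartsRec, PySem.List.length_pyRange_one]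
      omega
    · intro i h1 h2
      have hiN : i < n := by
        simpa [PySem.List.length_pyRange_one] using h1
      rw [List.getElem_map, PySem.List.getElem_pyRange_one, List.getElem_zip, List.getElem_zip,
          List.getElem_map, PySem.List.getElem_pyRange_one,
          getElem_pvStartsRec bs _ i (by simp; omega),
          counts_take_sum base e k i (by omega),
          counts_getElem base e k i (by omega)]
      rw [hext']
      simp only [zero_add, Prod.mk.injEq]
      exact ⟨by ring, trivial⟩
  · have hnz : nw ≠ 0 := hnw
    have hneg : nw < 0 := by omega
    have hb := PySem.Int.mod_neg_bounds sz hneg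
    have h1 : (PySem.Int.mod sz nw).toNat = 0 := by omega
    have h2 : (nw - PySem.Int.mod sz nw).toNat = 0 := by omega
    rw [PySem.List.pyRange_one_eq_nil (by omega)]
    simp [h1, h2, pvStarts]
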